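-- pv_equiv track=rewrite | github.com/open-mmlab/mmdetection | fashion_assignment.py | get_name_of_color_local
-- ===== SOURCE A (Python) =====
-- color_map = {
--     (255, 0, 0): 'red',
--     (0, 128, 0): 'green',
--     (0, 0, 255): 'blue',
--     (0, 255, 255): 'cyan',
--     (0, 0, 160): 'darkblue',
--     (173, 216, 230): 'lightblue',
--     (128, 0, 128): 'purple',
--     (255, 255, 0): 'yellow',
--     (0, 255, 0): 'lime',
--     (255, 0, 255): 'magenta',
--     (255, 255, 255): 'white',
--     (192, 192, 192): 'silver',
--     (128, 128, 128): 'grey',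
--     (0, 0, 0): 'black',
--     (255, 128, 64): 'orange',
--     (165, 42, 42): 'brown',
--     (128, 0, 0): 'maroon',
--     (128, 128, 0): 'olive'
-- }
--
-- def get_name_of_color_local(color_array):
--     requested_colour = (int(color_array[0]), int(color_array[1]), int(color_array[2]))
--
--     min_colours = {}
--
--     # for key, name in webcolors.css3_hex_to_names.items():
--     for key, name in color_map.items():
--         r_c, g_c, b_c = key
--         # if name == 'black':
--         #     lol = 0
--         rd = (r_c - requested_colour[0]) ** 2
--         gd = (g_c - requested_colour[1]) ** 2
--         bd = (b_c - requested_colour[2]) ** 2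
--         min_colours[(rd + gd + bd)] = name
--
--     return min_colours[min(min_colours.keys())]
-- ===== SOURCE B (Python) =====
-- color_map = {
--     (255, 0, 0): 'red',
--     (0, 128, 0): 'green',
--     (0, 0, 255): 'blue',
--     (0, 255, 255): 'cyan',
--     (0, 0, 160): 'darkblue',
--     (173, 216, 230): 'lightblue',
--     (128, 0, 128): 'purple',
--     (255, 255, 0): 'yellow',
--     (0, 255, 0): 'lime',
--     (255, 0, 255): 'magenta',
--     (255, 255, 255): 'white',
--     (192, 192, 192): 'silver',
--     (128, 128, 128): 'grey',
--     (0, 0, 0): 'black',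
--     (255, 128, 64): 'orange',
--     (165, 42, 42): 'brown',
--     (128, 0, 0): 'maroon',
--     (128, 128, 0): 'olive'
-- }
--
-- def get_name_of_color_local(color_array):
--     r0, g0, b0 = int(color_array[0]), int(color_array[1]), int(color_array[2])
--     best = None
--     for (r, g, b), name in color_map.items():
--         sq = (r - r0) ** 2 + (g - g0) ** 2 + (b - b0) ** 2
--         if best is None or sq <= best[0]:
--             best = (sq, name)
--     return best[1]
-- ===== Notes on version B (the rewrite author's own statement) =====
-- stated objective: simpler
-- what changed: Replaces the distance-keyed dict plus min(keys) lookup with a single pass keeping (best_dist, best_name), updating on sq <= best_dist so later equal-distance colors win exactly as A's dict overwrite does.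
import Mathlib
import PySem

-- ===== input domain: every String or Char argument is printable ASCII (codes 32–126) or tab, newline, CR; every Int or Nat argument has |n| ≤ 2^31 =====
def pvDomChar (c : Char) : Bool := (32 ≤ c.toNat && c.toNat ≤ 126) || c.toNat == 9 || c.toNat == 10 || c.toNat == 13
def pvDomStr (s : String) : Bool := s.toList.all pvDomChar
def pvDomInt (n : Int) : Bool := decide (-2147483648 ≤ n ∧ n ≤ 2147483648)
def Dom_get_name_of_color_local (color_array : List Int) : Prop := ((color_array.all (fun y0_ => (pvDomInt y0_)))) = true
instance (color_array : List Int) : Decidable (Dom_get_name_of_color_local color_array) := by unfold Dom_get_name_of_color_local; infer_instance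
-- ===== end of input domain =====

-- B replaces A's distance-keyed dict + min(keys) lookup by one pass keeping the best (distance, name) pair; simpler, same cost.


-- ===== PORT A =====
-- the module constant color_map, in insertion order
def colorMap : List ((Int × Int × Int) × String) :=
  [((255, 0, 0), "red"), ((0, 128, 0), "green"), ((0, 0, 255), "blue"),
   ((0, 255, 255), "cyan"), ((0, 0, 160), "darkblue"), ((173, 216, 230), "lightblue"),
   ((128, 0, 128), "purple"), ((255, 255, 0), "yellow"), ((0, 255, 0), "lime"),
   ((255, 0, 255), "magenta"), ((255, 255, 255), "white"), ((192, 192, 192), "silver"),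
   ((128, 128, 128), "grey"), ((0, 0, 0), "black"), ((255, 128, 64), "orange"),
   ((165, 42, 42), "brown"), ((128, 0, 0), "maroon"), ((128, 128, 0), "olive")]

def get_name_of_color_local (color_array : List Int) : String :=
  match PySem.List.pyGet? color_array 0, PySem.List.pyGet? color_array 1, PySem.List.pyGet? color_array 2 with
  | some c0, some c1, some c2 =>
      let min_colours : PySem.Dict Int String :=
        colorMap.foldl (fun d kp =>
          d.insert ((kp.1.1 - c0) ^ 2 + ((kp.1.2.1 - c1) ^ 2 + (kp.1.2.2 - c2) ^ 2)) kp.2)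
          PySem.Dict.empty
      min_colours.getD ((PySem.List.min? min_colours.keys (fun x => x)).getD 0) ""
  | _, _, _ => ""   -- IndexError: excluded by Pre_

-- ===== PORT B =====
def get_name_of_color_local_alt (color_array : List Int) : String :=
  match PySem.List.pyGet? color_array 0 with
  | none => ""   -- IndexError: excluded by Pre_
  | some c0 =>
    match PySem.List.pyGet? color_array 1 with
    | none => ""   -- IndexError: excluded by Pre_
    | some c1 =>
      match PySem.List.pyGet? color_array 2 with
      | none => ""   -- IndexError: excluded by Pre_
      | some c2 =>
      match colorMap.foldl (fun best kp =>
          match best with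
          | none => some ((kp.1.1 - c0) ^ 2 + ((kp.1.2.1 - c1) ^ 2 + (kp.1.2.2 - c2) ^ 2), kp.2)
          | some q =>
              if (kp.1.1 - c0) ^ 2 + ((kp.1.2.1 - c1) ^ 2 + (kp.1.2.2 - c2) ^ 2) ≤ q.1 then
                some ((kp.1.1 - c0) ^ 2 + ((kp.1.2.1 - c1) ^ 2 + (kp.1.2.2 - c2) ^ 2), kp.2)
              else best) (none : Option (Int × String)) with
      | some q => q.2
      | none => ""

-- ===== PRECONDITION & SPEC =====
-- Pre_ excludes only lists of fewer than 3 elements, on which A raises IndexError.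
def Pre_get_name_of_color_local (color_array : List Int) : Prop := 3 ≤ color_array.length
instance (color_array : List Int) : Decidable (Pre_get_name_of_color_local color_array) := by
  unfold Pre_get_name_of_color_local; infer_instance

def pvWitness_get_name_of_color_local : List Int := [10, 20, 30]

def Spec_get_name_of_color_local (color_array : List Int) (out : String) : Prop := out = get_name_of_color_local_alt color_array
instance (color_array : List Int) (out : String) : Decidable (Spec_get_name_of_color_local color_array out) := by unfold Spec_get_name_of_color_local; infer_instance

-- ===== CLAIM (what is proved, stated in full; the proofs are below) =====
def Claim_equal_get_name_of_color_local : Prop := ∀ (color_array : List Int), Dom_get_name_of_color_local color_array → Pre_get_name_of_color_local color_array → Spec_get_name_of_color_local color_array (get_name_of_color_local color_array)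

-- ===== LEMMAS AND PROOFS =====

-- generic forms of the two loops, over an arbitrary list of (distance, name) pairs
def pvBuild (l : List (Int × String)) : PySem.Dict Int String :=
  l.foldl (fun d p => d.insert p.1 p.2) PySem.Dict.empty

def pvStep (best : Option (Int × String)) (p : Int × String) : Option (Int × String) :=
  match best with
  | none => some p
  | some q => if p.1 ≤ q.1 then some p else best

theorem pv_min_append (ks : List Int) (x m : Int)
    (h : PySem.List.min? ks (fun y => y) = some m) :
    PySem.List.min? (ks ++ [x]) (fun y => y) = some (min m x) := by
  cases ks with
  | nil => simp [PySem.List.min?] at h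
  | cons k t =>
    rw [PySem.List.min?_id_cons] at h
    have hm : t.foldl min k = m := by injection h
    rw [List.cons_append, PySem.List.min?_id_cons, List.foldl_append, hm]
    simp

theorem pvBuild_append (t : List (Int × String)) (p : Int × String) :
    pvBuild (t ++ [p]) = (pvBuild t).insert p.1 p.2 := by
  simp [pvBuild, List.foldl_append]

-- the invariant tying A's dict/min/lookup to B's running best pair
theorem pv_combo (l : List (Int × String)) (hl : l ≠ []) :
    ∃ m n, l.foldl pvStep none = some (m, n) ∧
      PySem.List.min? (pvBuild l).keys (fun x => x) = some m ∧
      (pvBuild l).getD m "" = n ∧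
      (∀ x ∈ (pvBuild l).keys, m ≤ x) := by
  induction l using List.reverseRecOn with
  | nil => simp at hl
  | append_singleton t p ih =>
    cases t with
    | nil =>
      refine ⟨p.1, p.2, by simp [pvStep], ?_, ?_, ?_⟩ <;>
        simp [pvBuild, PySem.Dict.keys_insert_of_not_contains, PySem.List.min?_id_cons,
          PySem.Dict.getD_insert_self]
    | cons a t' =>
      obtain ⟨m, n, hB, hmin, hget, hub⟩ := ih (by simp)
      rw [pvBuild_append, List.foldl_append, hB]
      generalize hd : pvBuild (a :: t') = d at *
      by_cases hc : d.contains p.1 = true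
      · have hmem : p.1 ∈ d.keys := (PySem.Dict.contains_iff_mem_keys d p.1).mp hc
        have hkeys : (d.insert p.1 p.2).keys = d.keys :=
          PySem.Dict.keys_insert_of_contains d p.2 hc
        have hmp : m ≤ p.1 := hub _ hmem
        by_cases hle : p.1 ≤ m
        · have hpm : p.1 = m := le_antisymm hle hmp
          refine ⟨p.1, p.2, by simp [pvStep, hle], ?_, ?_, ?_⟩
          · rw [hkeys, hmin, hpm]
          · exact PySem.Dict.getD_insert_self _ _ _ _
          · rw [hkeys, hpm]; exact hub
        · refine ⟨m, n, by simp [pvStep, hle], ?_, ?_, ?_⟩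
          · rw [hkeys, hmin]
          · rw [PySem.Dict.getD_insert_of_ne d p.2 "" (by omega)]
            exact hget
          · rw [hkeys]; exact hub
      · have hc' : d.contains p.1 = false := by simpa using hc
        have hmem : m ∈ d.keys := PySem.List.min?_mem hmin
        have hpm : p.1 ≠ m := by
          intro h; rw [h] at hc'
          exact absurd ((PySem.Dict.contains_iff_mem_keys d m).mpr hmem) (by simp [hc'])
        have hkeys : (d.insert p.1 p.2).keys = d.keys ++ [p.1] :=
          PySem.Dict.keys_insert_of_not_contains d p.2 hc'
        have hmin' : PySem.List.min? (d.insert p.1 p.2).keys (fun x => x) = some (min m p.1) := by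
          rw [hkeys]; exact pv_min_append _ _ _ hmin
        by_cases hle : p.1 ≤ m
        · refine ⟨p.1, p.2, by simp [pvStep, hle], ?_, ?_, ?_⟩
          · rw [hmin']; congr 1; omega
          · exact PySem.Dict.getD_insert_self _ _ _ _
          · intro x hx
            rw [hkeys] at hx
            rcases List.mem_append.mp hx with hx | hx
            · exact le_trans hle (hub _ hx)
            · simp at hx; omega
        · refine ⟨m, n, by simp [pvStep, hle], ?_, ?_, ?_⟩
          · rw [hmin']; congr 1; omega
          · rw [PySem.Dict.getD_insert_of_ne d p.2 "" (by omega)]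
            exact hget
          · intro x hx
            rw [hkeys] at hx
            rcases List.mem_append.mp hx with hx | hx
            · exact hub _ hx
            · simp at hx; omega

theorem pyGet0 (a b c : Int) (t : List Int) : PySem.List.pyGet? (a :: b :: c :: t) 0 = some a := by
  simp [PySem.List.pyGet?, PySem.List.pyIdx?]
  rw [if_pos (by omega)]; simp

theorem pyGet1 (a b c : Int) (t : List Int) : PySem.List.pyGet? (a :: b :: c :: t) 1 = some b := by
  simp [PySem.List.pyGet?, PySem.List.pyIdx?]
  rw [if_pos (by omega)]; simp

theorem pyGet2 (a b c : Int) (t : List Int) : PySem.List.pyGet? (a :: b :: c :: t) 2 = some c := by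
  simp [PySem.List.pyGet?, PySem.List.pyIdx?]
  rw [if_pos (by omega)]; simp

theorem pvA_fold (c0 c1 c2 : Int) (l : List ((Int × Int × Int) × String)) :
    l.foldl (fun d kp =>
        d.insert ((kp.1.1 - c0) ^ 2 + ((kp.1.2.1 - c1) ^ 2 + (kp.1.2.2 - c2) ^ 2)) kp.2)
      PySem.Dict.empty
    = pvBuild (l.map (fun kp =>
        ((kp.1.1 - c0) ^ 2 + ((kp.1.2.1 - c1) ^ 2 + (kp.1.2.2 - c2) ^ 2), kp.2))) := by
  rw [pvBuild, List.foldl_map]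

theorem pvB_fold (c0 c1 c2 : Int) (l : List ((Int × Int × Int) × String)) :
    l.foldl (fun best kp =>
        match best with
        | none => some ((kp.1.1 - c0) ^ 2 + ((kp.1.2.1 - c1) ^ 2 + (kp.1.2.2 - c2) ^ 2), kp.2)
        | some q =>
            if (kp.1.1 - c0) ^ 2 + ((kp.1.2.1 - c1) ^ 2 + (kp.1.2.2 - c2) ^ 2) ≤ q.1 then
              some ((kp.1.1 - c0) ^ 2 + ((kp.1.2.1 - c1) ^ 2 + (kp.1.2.2 - c2) ^ 2), kp.2)
            else best) (none : Option (Int × String))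
    = (l.map (fun kp =>
        ((kp.1.1 - c0) ^ 2 + ((kp.1.2.1 - c1) ^ 2 + (kp.1.2.2 - c2) ^ 2), kp.2))).foldl pvStep none := by
  rw [List.foldl_map]; rfl

-- ===== VERDICT (by name: the statement is the Claim_ definition above) =====
theorem get_name_of_color_local_spec : Claim_equal_get_name_of_color_local := by
  intro ca _ hpre
  unfold Spec_get_name_of_color_local
  rcases ca with _ | ⟨a, _ | ⟨b, _ | ⟨c, t⟩⟩⟩
  · exact absurd hpre (by simp [Pre_get_name_of_color_local])
  · exact absurd hpre (by simp [Pre_get_name_of_color_local])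
  · exact absurd hpre (by simp [Pre_get_name_of_color_local])
  unfold get_name_of_color_local get_name_of_color_local_alt
  rw [pyGet0, pyGet1, pyGet2]
  dsimp only
  rw [pvA_fold, pvB_fold]
  obtain ⟨m, n, hB, hmin, hget, -⟩ := pv_combo
    (colorMap.map (fun kp =>
      ((kp.1.1 - a) ^ 2 + ((kp.1.2.1 - b) ^ 2 + (kp.1.2.2 - c) ^ 2), kp.2)))
    (by simp [colorMap])
  rw [hB, hmin]
  dsimp only [Option.getD_some]
  exact hget
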